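-- pv_equiv track=rewrite | github.com/goldsmdn/SteaneCode | helper_functions.py | find_individual_ancilla_values
-- ===== SOURCE A (Python) =====
-- def find_individual_ancilla_values(ancilla_values, data_qubits,
--                                     ancilla_qubits, label_string = ''):
--     """Returns the count of individual ancilla bit strings as a dictionary.
--
--     Parameters
--     ----------
--     ancilla_values : dict
--         holds the counts for each combination of ancilla bit strings.
--     data_qubits : int
--         number of data qubits used as an offset to calculate
--         the ancilla number
--     ancilla_qubits : int
--         number of ancilla qubits
--     label_string : str
--         first part of label
--
--     Returns
--     -------
--     individual_ancilla_values : dict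
--         dictionary containing the count of individual
--         ancilla bit string
--     """
--
--     #initialise dictionary to hold values
--     individual_ancilla_values = {label_string + str(count): 0
--                                 for count in range(data_qubits + 1,
--                                                     data_qubits + 1 +
--                                                     ancilla_qubits) }
--
--     for ancilla, value in ancilla_values.items():
--         for count in range(ancilla_qubits):
--             bit = ancilla[count]
--             if bit == '1':
--                 # note that order of Qiskit qubit order needs to be reversed to compare with the paper
--                 key = label_string + str(data_qubits + ancilla_qubits - count)
--                 old_count = individual_ancilla_values[key]
--                 new_count = old_count + value
--                 individual_ancilla_values[key] = new_count
--     return(individual_ancilla_values)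
-- ===== SOURCE B (Python) =====
-- def find_individual_ancilla_values(ancilla_values, data_qubits,
--                                     ancilla_qubits, label_string = ''):
--     """Returns the count of individual ancilla bit strings as a dictionary.
--
--     Column-major re-implementation: one dict comprehension builds each
--     per-qubit total directly by scanning the ancilla strings at that bit
--     position, instead of initialising a zeroed dict and accumulating
--     row by row.
--     """
--     return {label_string + str(data_qubits + ancilla_qubits - count):
--                 sum(value for ancilla, value in ancilla_values.items()
--                     if ancilla[count] == '1')
--             for count in reversed(range(ancilla_qubits))}
-- ===== Notes on version B (the rewrite author's own statement) =====
-- stated objective: simpler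
-- what changed: Replaces the zeroed-dict initialisation plus row-by-row accumulation over ancilla strings with a single column-major dict comprehension that computes each per-qubit total directly as a sum over the entries at that bit position.
import Mathlib
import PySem

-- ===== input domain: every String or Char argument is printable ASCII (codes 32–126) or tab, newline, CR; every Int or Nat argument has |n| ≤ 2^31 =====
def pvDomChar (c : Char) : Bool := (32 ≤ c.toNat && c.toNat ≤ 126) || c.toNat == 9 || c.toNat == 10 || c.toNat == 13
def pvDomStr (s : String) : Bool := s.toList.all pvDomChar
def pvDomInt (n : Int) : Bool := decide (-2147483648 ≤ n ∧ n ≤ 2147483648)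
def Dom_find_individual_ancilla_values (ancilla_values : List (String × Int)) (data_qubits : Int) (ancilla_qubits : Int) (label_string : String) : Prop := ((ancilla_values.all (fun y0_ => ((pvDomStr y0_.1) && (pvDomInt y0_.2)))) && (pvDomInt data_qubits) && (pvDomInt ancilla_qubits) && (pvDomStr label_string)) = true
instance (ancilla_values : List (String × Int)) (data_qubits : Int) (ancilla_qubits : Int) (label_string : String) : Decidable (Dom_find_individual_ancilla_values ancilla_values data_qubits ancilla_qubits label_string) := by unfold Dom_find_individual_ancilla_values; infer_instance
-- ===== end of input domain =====

-- B replaces A's zeroed-dict initialisation + row-by-row accumulation with one column-major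
-- comprehension computing each per-qubit total directly (same cost; simpler).


-- ===== PORT A =====
def find_individual_ancilla_values (ancilla_values : List (String × Int)) (data_qubits : Int) (ancilla_qubits : Int) (label_string : String) : List (String × Int) :=
  -- initialise dictionary to hold values
  let init : PySem.Dict String Int :=
    (PySem.List.pyRange (data_qubits + 1) (data_qubits + 1 + ancilla_qubits)).foldl
      (fun d count => d.insert (label_string ++ PySem.Int.toStr count) 0) PySem.Dict.empty
  let final : PySem.Dict String Int :=
    (PySem.Dict.ofList ancilla_values).items.foldl
      (fun d p =>
        (PySem.List.pyRange 0 ancilla_qubits).foldl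
          (fun d count =>
            match PySem.Str.pyGet? p.1 count with     -- bit = ancilla[count]; none = IndexError, excluded by Pre_
            | some bit =>
              if bit = '1' then
                let key := label_string ++ PySem.Int.toStr (data_qubits + ancilla_qubits - count)
                match d.get? key with                 -- old_count = individual_ancilla_values[key]; none = KeyError, never reached
                | some old_count => d.insert key (old_count + p.2)
                | none => d
              else d
            | none => d)
          d)
      init
  final.items

-- ===== PORT B =====
def find_individual_ancilla_values_alt (ancilla_values : List (String × Int)) (data_qubits : Int) (ancilla_qubits : Int) (label_string : String) : List (String × Int) :=
  ((PySem.List.pyRange 0 ancilla_qubits).reverse.foldl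
    (fun d count =>
      d.insert (label_string ++ PySem.Int.toStr (data_qubits + ancilla_qubits - count))
        ((((PySem.Dict.ofList ancilla_values).items.filter
            (fun p => PySem.Str.pyGet? p.1 count == some '1')).map (fun p => p.2)).sum))
    (PySem.Dict.empty : PySem.Dict String Int)).items

-- ===== PRECONDITION & SPEC =====
-- Pre_ excludes exactly the inputs where Python A raises IndexError: some ancilla bit string
-- shorter than ancilla_qubits (ancilla[count] is accessed for every count < ancilla_qubits).
def Pre_find_individual_ancilla_values (ancilla_values : List (String × Int)) (data_qubits : Int) (ancilla_qubits : Int) (label_string : String) : Prop :=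
  ∀ p ∈ ancilla_values, ancilla_qubits ≤ PySem.Str.len p.1
instance (ancilla_values : List (String × Int)) (data_qubits : Int) (ancilla_qubits : Int) (label_string : String) : Decidable (Pre_find_individual_ancilla_values ancilla_values data_qubits ancilla_qubits label_string) := by unfold Pre_find_individual_ancilla_values; infer_instance

def pvWitness_find_individual_ancilla_values : (List (String × Int)) × Int × Int × String :=
  ([("10", 3), ("01", 2), ("11", 1)], 1, 2, "a")

def Spec_find_individual_ancilla_values (ancilla_values : List (String × Int)) (data_qubits : Int) (ancilla_qubits : Int) (label_string : String) (out : List (String × Int)) : Prop := out = find_individual_ancilla_values_alt ancilla_values data_qubits ancilla_qubits label_string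
instance (ancilla_values : List (String × Int)) (data_qubits : Int) (ancilla_qubits : Int) (label_string : String) (out : List (String × Int)) : Decidable (Spec_find_individual_ancilla_values ancilla_values data_qubits ancilla_qubits label_string out) := by unfold Spec_find_individual_ancilla_values; infer_instance

-- ===== CLAIM (what is proved, stated in full; the proofs are below) =====
def Claim_equal_find_individual_ancilla_values : Prop := ∀ (ancilla_values : List (String × Int)) (data_qubits : Int) (ancilla_qubits : Int) (label_string : String), Dom_find_individual_ancilla_values ancilla_values data_qubits ancilla_qubits label_string → Pre_find_individual_ancilla_values ancilla_values data_qubits ancilla_qubits label_string → Spec_find_individual_ancilla_values ancilla_values data_qubits ancilla_qubits label_string (find_individual_ancilla_values ancilla_values data_qubits ancilla_qubits label_string)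

-- ===== LEMMAS AND PROOFS =====

-- decimal decoding inverts Nat.toDigits 10, hence str(n) is injective
def pvDec (l : List Char) : Nat := l.foldl (fun a c => 10 * a + (c.toNat - 48)) 0

theorem pvDec_append_singleton (l : List Char) (c : Char) :
    pvDec (l ++ [c]) = 10 * pvDec l + (c.toNat - 48) := by
  simp [pvDec, List.foldl_append]

theorem pvDigitChar_toNat {d : Nat} (h : d < 10) : (Nat.digitChar d).toNat = 48 + d := by
  interval_cases d <;> rfl

theorem pvDec_toDigits (n : Nat) : pvDec (Nat.toDigits 10 n) = n := by
  induction n using Nat.strong_induction_on with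
  | _ n ih =>
    rcases Nat.lt_or_ge n 10 with h | h
    · rw [Nat.toDigits_of_lt_base h]
      simp [pvDec, pvDigitChar_toNat h]
    · rw [Nat.toDigits_of_base_le (by norm_num) h, pvDec_append_singleton,
        ih (n / 10) (Nat.div_lt_self (by omega) (by norm_num)),
        pvDigitChar_toNat (Nat.mod_lt _ (by norm_num))]
      omega

theorem pvToDigits_mem_isDigit (n : Nat) : ∀ c ∈ Nat.toDigits 10 n, c.isDigit := by
  induction n using Nat.strong_induction_on with
  | _ n ih =>
    rcases Nat.lt_or_ge n 10 with h | h
    · rw [Nat.toDigits_of_lt_base h]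
      intro c hc
      simp at hc
      subst hc
      interval_cases n <;> decide
    · rw [Nat.toDigits_of_base_le (by norm_num) h]
      intro c hc
      rcases List.mem_append.1 hc with hc | hc
      · exact ih (n / 10) (Nat.div_lt_self (by omega) (by norm_num)) c hc
      · simp at hc
        subst hc
        have := Nat.mod_lt n (show 0 < 10 by norm_num)
        interval_cases h : n % 10 <;> simp_all

theorem pvToDigits_inj {a b : Nat} (h : Nat.toDigits 10 a = Nat.toDigits 10 b) : a = b := by
  have := congrArg pvDec h
  rwa [pvDec_toDigits, pvDec_toDigits] at this

theorem pvToStr_injective : Function.Injective PySem.Int.toStr := by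
  intro a b h
  have h' : PySem.Int.toChars a = PySem.Int.toChars b := by
    have := congrArg String.toList h
    rwa [PySem.Int.toList_toStr, PySem.Int.toList_toStr] at this
  unfold PySem.Int.toChars at h'
  split_ifs at h' with ha hb hb
  · have := pvToDigits_inj (List.cons_injective h')
    omega
  · exfalso
    have hd : ('-' : Char) ∈ Nat.toDigits 10 b.toNat := by
      rw [← h']; simp
    have := pvToDigits_mem_isDigit b.toNat '-' hd
    simp [Char.isDigit] at this
  · exfalso
    have hd : ('-' : Char) ∈ Nat.toDigits 10 a.toNat := by
      rw [h']; simp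
    have := pvToDigits_mem_isDigit a.toNat '-' hd
    simp [Char.isDigit] at this
  · have := pvToDigits_inj h'
    omega

theorem pvKey_inj (L : String) : Function.Injective (fun j : Int => L ++ PySem.Int.toStr j) := by
  intro a b h
  exact pvToStr_injective ((String.append_right_inj L).mp h)

theorem pvRange_nodup (a b : Int) : (PySem.List.pyRange a b).Nodup := by
  rw [PySem.List.pyRange_of_pos a b (by norm_num : (0:Int) < 1)]
  refine List.Nodup.map ?_ List.nodup_range
  intro x y h
  simpa using h

-- reindexing the reversed 0..n-1 range through c ↦ t - c
theorem pvRange_rev_map (n : Nat) (t : Int) :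
    ((PySem.List.pyRange 0 (n : Int)).reverse.map (fun c => t - c)) =
      PySem.List.pyRange (t - n + 1) (t + 1) := by
  induction n with
  | zero =>
    rw [PySem.List.pyRange_one_eq_nil (by norm_num), PySem.List.pyRange_one_eq_nil (by omega)]
    simp
  | succ m ih =>
    rw [show ((m + 1 : Nat) : Int) = (m : Int) + 1 by push_cast; ring,
      PySem.List.pyRange_one_succ_right (by positivity)]
    simp only [List.reverse_append, List.reverse_cons, List.reverse_nil, List.nil_append]
    rw [List.singleton_append, List.map_cons, ih, ← PySem.List.pyRange_one_cons (by omega)]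
    congr 1
    ring

-- inner loop of A: effect on get? at an arbitrary query string
theorem pv_inner_get? (L : String) (dq aq : Int) (s : String) (v : Int) (cs : List Int)
    (d : PySem.Dict String Int) (q : String) :
    (cs.foldl (fun d count =>
        match PySem.Str.pyGet? s count with
        | some bit =>
          if bit = '1' then
            let key := L ++ PySem.Int.toStr (dq + aq - count)
            match d.get? key with
            | some old_count => d.insert key (old_count + v)
            | none => d
          else d
        | none => d) d).get? q
    = (d.get? q).map (fun old => old + v *
        (cs.countP (fun c => (PySem.Str.pyGet? s c == some '1')
            && (L ++ PySem.Int.toStr (dq + aq - c) == q)) : Int)) := by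
  induction cs generalizing d with
  | nil => simp
  | cons c cs ih =>
    rw [List.foldl_cons, ih, List.countP_cons]
    rcases h1 : PySem.Str.pyGet? s c with _ | bit
    · simp
    · by_cases hb : bit = '1'
      · subst hb
        simp only [if_true]
        rcases h2 : d.get? (L ++ PySem.Int.toStr (dq + aq - c)) with _ | old
        · simp only
          by_cases hq : q = L ++ PySem.Int.toStr (dq + aq - c)
          · subst hq; simp [h2]
          · have : (L ++ PySem.Int.toStr (dq + aq - c) == q) = false := by
              simp only [beq_eq_false_iff_ne, ne_eq]
              exact fun h => hq h.symm
            simp [this]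
        · simp only
          rw [PySem.Dict.get?_insert]
          by_cases hq : q = L ++ PySem.Int.toStr (dq + aq - c)
          · subst hq
            simp only [h2]
            simp [Option.map]
            ring
          · rw [if_neg hq]
            have : (L ++ PySem.Int.toStr (dq + aq - c) == q) = false := by
              simp only [beq_eq_false_iff_ne, ne_eq]
              exact fun h => hq h.symm
            simp [this]
      · have : (bit == '1') = false := by simp [hb]
        simp [hb]

-- the inner loop only overwrites existing keys
theorem pv_inner_keys (L : String) (dq aq : Int) (s : String) (v : Int) (cs : List Int)
    (d : PySem.Dict String Int) :
    (cs.foldl (fun d count =>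
        match PySem.Str.pyGet? s count with
        | some bit =>
          if bit = '1' then
            let key := L ++ PySem.Int.toStr (dq + aq - count)
            match d.get? key with
            | some old_count => d.insert key (old_count + v)
            | none => d
          else d
        | none => d) d).keys = d.keys := by
  induction cs generalizing d with
  | nil => rfl
  | cons c cs ih =>
    rw [List.foldl_cons, ih]
    rcases h1 : PySem.Str.pyGet? s c with _ | bit
    · simp
    · by_cases hb : bit = '1'
      · subst hb
        simp only [if_true]
        rcases h2 : d.get? (L ++ PySem.Int.toStr (dq + aq - c)) with _ | old
        · simp
        · simp only
          refine PySem.Dict.keys_insert_of_contains d _ ?_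
          rw [PySem.Dict.contains_eq_isSome_get?, h2]
          rfl
      · simp [hb]

-- outer loop of A over the dict items
theorem pv_outer_get? (L : String) (dq aq : Int) (ps : List (String × Int))
    (d : PySem.Dict String Int) (q : String) :
    (ps.foldl (fun d p =>
        (PySem.List.pyRange 0 aq).foldl (fun d count =>
          match PySem.Str.pyGet? p.1 count with
          | some bit =>
            if bit = '1' then
              let key := L ++ PySem.Int.toStr (dq + aq - count)
              match d.get? key with
              | some old_count => d.insert key (old_count + p.2)
              | none => d
            else d
          | none => d) d) d).get? q
    = (d.get? q).map (fun old => old +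
        ((ps.map (fun p => p.2 *
          ((PySem.List.pyRange 0 aq).countP (fun c => (PySem.Str.pyGet? p.1 c == some '1')
              && (L ++ PySem.Int.toStr (dq + aq - c) == q)) : Int))).sum)) := by
  induction ps generalizing d with
  | nil => simp
  | cons p ps ih =>
    rw [List.foldl_cons, ih, pv_inner_get?, Option.map_map, List.map_cons, List.sum_cons]
    cases d.get? q with
    | none => rfl
    | some old => simp

theorem pv_outer_keys (L : String) (dq aq : Int) (ps : List (String × Int))
    (d : PySem.Dict String Int) :
    (ps.foldl (fun d p =>
        (PySem.List.pyRange 0 aq).foldl (fun d count =>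
          match PySem.Str.pyGet? p.1 count with
          | some bit =>
            if bit = '1' then
              let key := L ++ PySem.Int.toStr (dq + aq - count)
              match d.get? key with
              | some old_count => d.insert key (old_count + p.2)
              | none => d
            else d
          | none => d) d) d).keys = d.keys := by
  induction ps generalizing d with
  | nil => rfl
  | cons p ps ih => rw [List.foldl_cons, ih, pv_inner_keys]

-- countP where the second conjunct pins c to a single value
theorem pv_countP_single (l : List Int) (c0 : Int) (f : Int → Bool) (g : Int → Bool)
    (hg : ∀ c, g c = true ↔ c = c0) (hnd : l.Nodup) (hmem : c0 ∈ l) :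
    l.countP (fun c => f c && g c) = if f c0 then 1 else 0 := by
  induction l with
  | nil => cases hmem
  | cons a l ih =>
    rw [List.countP_cons]
    rcases List.nodup_cons.1 hnd with ⟨hna, hnl⟩
    by_cases ha : a = c0
    · subst ha
      have h0 : l.countP (fun c => f c && g c) = 0 := by
        rw [List.countP_eq_zero]
        intro c hc
        have : g c = false := by
          rw [← Bool.not_eq_true, hg]
          exact fun h => hna (h ▸ hc)
        simp [this]
      rw [h0, (hg a).2 rfl]
      by_cases hf : f a <;> simp [hf]
    · have hga : g a = false := by
        rw [← Bool.not_eq_true, hg]; exact ha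
      have : c0 ∈ l := by
        rcases List.mem_cons.1 hmem with h | h
        · exact absurd h.symm ha
        · exact h
      rw [ih hnl this, hga]
      simp

-- a ±-indicator sum is the filtered sum
theorem pv_sum_ite (ps : List (String × Int)) (f : String → Bool) :
    (ps.map (fun p => p.2 * (if f p.1 then (1:Int) else 0))).sum
      = ((ps.filter (fun p => f p.1)).map (fun p => p.2)).sum := by
  induction ps with
  | nil => rfl
  | cons p ps ih =>
    by_cases h : f p.1 <;>
      simp only [List.map_cons, List.sum_cons, List.filter_cons, h, if_true, if_false, ih,
        mul_one, mul_zero, zero_add, Bool.false_eq_true]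

theorem pv_main (av : List (String × Int)) (dq aq : Int) (L : String) :
    find_individual_ancilla_values av dq aq L = find_individual_ancilla_values_alt av dq aq L := by
  by_cases haq : 0 ≤ aq
  case neg =>
    have hC : PySem.List.pyRange 0 aq = [] := PySem.List.pyRange_one_eq_nil (by omega)
    have hR : PySem.List.pyRange (dq + 1) (dq + 1 + aq) = [] := PySem.List.pyRange_one_eq_nil (by omega)
    simp [find_individual_ancilla_values, find_individual_ancilla_values_alt, hC, hR]
  case pos =>
    obtain ⟨n, hn⟩ : ∃ n : Nat, aq = (n : Int) := ⟨aq.toNat, (Int.toNat_of_nonneg haq).symm⟩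
    have hkinj := pvKey_inj L
    have hRnd := pvRange_nodup (dq + 1) (dq + 1 + aq)
    have hmapnd : ((PySem.List.pyRange (dq + 1) (dq + 1 + aq)).map
        (fun j : Int => L ++ PySem.Int.toStr j)).Nodup := hRnd.map hkinj
    -- the initial dict: all keys fresh and distinct
    have hinit : ((PySem.List.pyRange (dq + 1) (dq + 1 + aq)).foldl
        (fun d count => d.insert (L ++ PySem.Int.toStr count) 0) (PySem.Dict.empty : PySem.Dict String Int)).items
        = (PySem.List.pyRange (dq + 1) (dq + 1 + aq)).map
            (fun j => (L ++ PySem.Int.toStr j, (0 : Int))) := by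
      have := PySem.Dict.items_foldl_insert_fresh
        (l := PySem.List.pyRange (dq + 1) (dq + 1 + aq))
        (k := fun c : Int => L ++ PySem.Int.toStr c) (v := fun _ => (0 : Int)) PySem.Dict.empty
        (by intro a _; simp) hmapnd
      simpa using this
    have hinitk : ((PySem.List.pyRange (dq + 1) (dq + 1 + aq)).foldl
        (fun d count => d.insert (L ++ PySem.Int.toStr count) 0) (PySem.Dict.empty : PySem.Dict String Int)).keys
        = (PySem.List.pyRange (dq + 1) (dq + 1 + aq)).map (fun j : Int => L ++ PySem.Int.toStr j) := by
      simp only [PySem.Dict.keys, hinit, List.map_map]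
      rfl
    have hinitget : ∀ j ∈ PySem.List.pyRange (dq + 1) (dq + 1 + aq),
        ((PySem.List.pyRange (dq + 1) (dq + 1 + aq)).foldl
          (fun d count => d.insert (L ++ PySem.Int.toStr count) 0) (PySem.Dict.empty : PySem.Dict String Int)).get?
            (L ++ PySem.Int.toStr j) = some 0 := by
      intro j hj
      refine PySem.Dict.get?_of_mem_items _ ?_ ?_
      · rw [hinit]
        exact List.mem_map.2 ⟨j, hj, rfl⟩
      · rw [hinitk]
        exact hmapnd
    -- the pinned countP at query key j
    have hcnt : ∀ j ∈ PySem.List.pyRange (dq + 1) (dq + 1 + aq), ∀ s : String,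
        (((PySem.List.pyRange 0 aq).countP (fun c => (PySem.Str.pyGet? s c == some '1')
            && (L ++ PySem.Int.toStr (dq + aq - c) == L ++ PySem.Int.toStr j))) : Int)
          = (if (PySem.Str.pyGet? s (dq + aq - j) == some '1') then (1 : Int) else 0) := by
      intro j hj s
      have hj' := PySem.List.mem_pyRange_one.1 hj
      rw [pv_countP_single (PySem.List.pyRange 0 aq) (dq + aq - j)
        (fun c => PySem.Str.pyGet? s c == some '1')
        (fun c => L ++ PySem.Int.toStr (dq + aq - c) == L ++ PySem.Int.toStr j)
        ?_ (pvRange_nodup 0 aq) ?_]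
      · split <;> simp
      · intro c
        rw [beq_iff_eq]
        constructor
        · intro h
          have := hkinj h
          omega
        · intro h
          subst h
          have : dq + aq - (dq + aq - j) = j := by ring
          rw [this]
      · exact PySem.List.mem_pyRange_one.2 (by omega)
    -- value of A's final dict at key j
    have hval : ∀ j ∈ PySem.List.pyRange (dq + 1) (dq + 1 + aq),
        (((PySem.Dict.ofList av).items.foldl
          (fun d p =>
            (PySem.List.pyRange 0 aq).foldl
              (fun d count =>
                match PySem.Str.pyGet? p.1 count with
                | some bit =>
                  if bit = '1' then
                    let key := L ++ PySem.Int.toStr (dq + aq - count)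
                    match d.get? key with
                    | some old_count => d.insert key (old_count + p.2)
                    | none => d
                  else d
                | none => d) d)
          ((PySem.List.pyRange (dq + 1) (dq + 1 + aq)).foldl
            (fun d count => d.insert (L ++ PySem.Int.toStr count) 0)
            (PySem.Dict.empty : PySem.Dict String Int))).getD (L ++ PySem.Int.toStr j) 0)
        = (((PySem.Dict.ofList av).items.filter
            (fun p => PySem.Str.pyGet? p.1 (dq + aq - j) == some '1')).map (fun p => p.2)).sum := by
      intro j hj
      rw [PySem.Dict.getD_eq_get?_getD, pv_outer_get?, hinitget j hj]
      simp only [Option.map_some, Option.getD_some, zero_add]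
      have hmc : (PySem.Dict.ofList av).items.map (fun p => p.2 *
            (((PySem.List.pyRange 0 aq).countP (fun c => (PySem.Str.pyGet? p.1 c == some '1')
              && (L ++ PySem.Int.toStr (dq + aq - c) == L ++ PySem.Int.toStr j))) : Int))
          = (PySem.Dict.ofList av).items.map (fun p => p.2 *
            (if (PySem.Str.pyGet? p.1 (dq + aq - j) == some '1') then (1 : Int) else 0)) := by
        refine List.map_congr_left ?_
        intro p _
        rw [hcnt j hj p.1]
      rw [hmc, pv_sum_ite (PySem.Dict.ofList av).items (fun s => PySem.Str.pyGet? s (dq + aq - j) == some '1')]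
    -- A's result row by row
    have hA : find_individual_ancilla_values av dq aq L
        = (PySem.List.pyRange (dq + 1) (dq + 1 + aq)).map
            (fun j => (L ++ PySem.Int.toStr j,
              (((PySem.Dict.ofList av).items.filter
                (fun p => PySem.Str.pyGet? p.1 (dq + aq - j) == some '1')).map
                  (fun p => p.2)).sum)) := by
      simp only [find_individual_ancilla_values]
      have hk : (((PySem.Dict.ofList av).items.foldl
          (fun d p =>
            (PySem.List.pyRange 0 aq).foldl
              (fun d count =>
                match PySem.Str.pyGet? p.1 count with
                | some bit =>
                  if bit = '1' then
                    let key := L ++ PySem.Int.toStr (dq + aq - count)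
                    match d.get? key with
                    | some old_count => d.insert key (old_count + p.2)
                    | none => d
                  else d
                | none => d) d)
          ((PySem.List.pyRange (dq + 1) (dq + 1 + aq)).foldl
            (fun d count => d.insert (L ++ PySem.Int.toStr count) 0)
            (PySem.Dict.empty : PySem.Dict String Int))).keys)
          = (PySem.List.pyRange (dq + 1) (dq + 1 + aq)).map (fun j : Int => L ++ PySem.Int.toStr j) := by
        rw [pv_outer_keys, hinitk]
      rw [PySem.Dict.items_eq_map_keys _ (by rw [hk]; exact hmapnd) 0, hk, List.map_map]
      refine List.map_congr_left ?_
      intro j hj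
      simp only [Function.comp]
      exact congrArg (fun w => (L ++ PySem.Int.toStr j, w)) (hval j hj)
    -- B's result
    have hsub : (PySem.List.pyRange 0 aq).reverse.map (fun c => dq + aq - c)
        = PySem.List.pyRange (dq + 1) (dq + 1 + aq) := by
      rw [hn, pvRange_rev_map n (dq + (n : Int))]
      have e1 : dq + (n : Int) - (n : Int) + 1 = dq + 1 := by ring
      have e2 : dq + (n : Int) + 1 = dq + 1 + (n : Int) := by ring
      rw [e1, e2]
    have hBnd : (((PySem.List.pyRange 0 aq).reverse).map
        (fun c => L ++ PySem.Int.toStr (dq + aq - c))).Nodup := by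
      have e : ((PySem.List.pyRange 0 aq).reverse).map
            (fun c => L ++ PySem.Int.toStr (dq + aq - c))
          = ((PySem.List.pyRange 0 aq).reverse.map (fun c => dq + aq - c)).map
              (fun j : Int => L ++ PySem.Int.toStr j) := by
        rw [List.map_map]
        rfl
      rw [e, hsub]
      exact hmapnd
    have hB : find_individual_ancilla_values_alt av dq aq L
        = (PySem.List.pyRange 0 aq).reverse.map
            (fun c => (L ++ PySem.Int.toStr (dq + aq - c),
              (((PySem.Dict.ofList av).items.filter
                (fun p => PySem.Str.pyGet? p.1 c == some '1')).map (fun p => p.2)).sum)) := by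
      simp only [find_individual_ancilla_values_alt]
      have := PySem.Dict.items_foldl_insert_fresh
        (l := (PySem.List.pyRange 0 aq).reverse)
        (k := fun c : Int => L ++ PySem.Int.toStr (dq + aq - c))
        (v := fun c : Int => (((PySem.Dict.ofList av).items.filter
            (fun p => PySem.Str.pyGet? p.1 c == some '1')).map (fun p => p.2)).sum)
        PySem.Dict.empty (by intro a _; simp) hBnd
      simpa using this
    rw [hA, hB, ← hsub, List.map_map]
    refine List.map_congr_left ?_
    intro c hc
    simp only [Function.comp]
    have e : dq + aq - (dq + aq - c) = c := by ring
    rw [e]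

-- ===== VERDICT (by name: the statement is the Claim_ definition above) =====
theorem find_individual_ancilla_values_spec : Claim_equal_find_individual_ancilla_values := by
  intro av dq aq L _ _
  unfold Spec_find_individual_ancilla_values
  exact pv_main av dq aq L
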